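-- pv_equiv track=rewrite | github.com/Priya15073/Analyze-tweets-related-to-Coronovirus | consumer.py | comp_x_val
-- ===== SOURCE A (Python) =====
-- def comp_x_val(list1):
--
--     xval = []
--     for i in range(len(list1)):
--         count = 0;
--         for j in range(len(list1) - i):
--             if (list1[i] == list1[i + j]):
--                 count += 1
--         xval.append(count)
--
--     return xval
-- ===== SOURCE B (Python) =====
-- def comp_x_val(list1):
--     # One right-to-left pass keeping a dict of value counts in the suffix seen so far.
--     counts = {}
--     out = []
--     for x in reversed(list1):
--         c = counts.get(x, 0) + 1
--         counts[x] = c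
--         out.append(c)
--     return out[::-1]
-- ===== Notes on version B (the rewrite author's own statement) =====
-- stated objective: faster
-- what changed: Replaced the nested suffix scan per index by a single right-to-left pass that maintains a dict of suffix counts.
import Mathlib
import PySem

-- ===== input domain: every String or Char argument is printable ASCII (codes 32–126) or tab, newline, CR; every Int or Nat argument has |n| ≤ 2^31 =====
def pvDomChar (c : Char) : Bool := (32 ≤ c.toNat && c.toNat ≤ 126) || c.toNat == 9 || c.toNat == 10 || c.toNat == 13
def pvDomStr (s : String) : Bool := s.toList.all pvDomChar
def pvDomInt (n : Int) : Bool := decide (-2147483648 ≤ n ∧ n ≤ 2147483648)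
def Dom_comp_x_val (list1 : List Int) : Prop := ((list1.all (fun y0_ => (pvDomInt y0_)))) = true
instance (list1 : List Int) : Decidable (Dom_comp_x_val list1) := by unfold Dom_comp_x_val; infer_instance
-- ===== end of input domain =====

-- B replaces A's O(n^2) nested suffix scan by a single right-to-left pass with a dict of suffix counts.

-- ===== PORT A =====
-- literal port of A: outer loop i in range(len), inner loop j in range(len-i) counting list1[i] == list1[i+j]
def comp_x_val (list1 : List Int) : List Int :=
  (PySem.List.pyRange 0 (list1.length : Int) 1).foldl
    (fun xval i =>
      let count : Int :=
        (PySem.List.pyRange 0 ((list1.length : Int) - i) 1).foldl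
          (fun c j =>
            if PySem.List.pyGetD list1 i 0 = PySem.List.pyGetD list1 (i + j) 0 then c + 1 else c)
          0
      xval ++ [count])
    []

-- ===== PORT B =====
-- literal port of B: for x in reversed(list1): counts[x] = counts.get(x,0)+1; out.append(counts[x]); return out[::-1]
def comp_x_val_alt (list1 : List Int) : List Int :=
  (list1.reverse.foldl
    (fun (p : PySem.Dict Int Int × List Int) x =>
      let c := p.1.getD x 0 + 1
      (p.1.insert x c, p.2 ++ [c]))
    (PySem.Dict.empty, [])).2.reverse  -- out[::-1] is exactly list reversal

-- ===== PRECONDITION & SPEC =====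
def Spec_comp_x_val (list1 : List Int) (out : List Int) : Prop := out = comp_x_val_alt list1
instance (list1 : List Int) (out : List Int) : Decidable (Spec_comp_x_val list1 out) := by unfold Spec_comp_x_val; infer_instance

-- ===== CLAIM (what is proved, stated in full; the proofs are below) =====
def Claim_equal_comp_x_val : Prop := ∀ (list1 : List Int), Dom_comp_x_val list1 → Spec_comp_x_val list1 (comp_x_val list1)

-- ===== LEMMAS AND PROOFS =====

-- common specification: at each position, the count of the head in the remaining suffix
def pvF : List Int → List Int
  | [] => []
  | x :: xs => ((x :: xs).count x : Int) :: pvF xs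

-- the suffix of l starting at k, written out by index
theorem pv_drop_eq_map_range (l : List Int) (k : Nat) (hk : k ≤ l.length) :
    l.drop k = (List.range (l.length - k)).map (fun j => l.getD (k + j) 0) := by
  apply List.ext_getElem
  · simp
  · intro m h1 h2
    have hm : k + m < l.length := by simp at h1; omega
    simp [List.getD, List.getElem?_eq_getElem hm]

theorem pv_foldl_count_ite {α : Type} (p : α → Prop) [DecidablePred p] (l : List α) (a : Int) :
    List.foldl (fun acc x => if p x then acc + 1 else acc) a l
      = a + ((l.countP (fun x => decide (p x)) : Nat) : Int) := by
  induction l generalizing a with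
  | nil => simp
  | cons x xs ih => by_cases h : p x <;> simp [h, ih] <;> ring

theorem pvA_inner (l : List Int) (k : Nat) (hk : k < l.length) :
    (PySem.List.pyRange 0 ((l.length : Int) - (k : Int)) 1).foldl
      (fun c j =>
        if PySem.List.pyGetD l (k : Int) 0 = PySem.List.pyGetD l ((k : Int) + j) 0 then c + 1 else c)
      0
    = ((l.drop k).count (l.getD k 0) : Int) := by
  have hcast : (l.length : Int) - (k : Int) = ((l.length - k : Nat) : Int) := by
    push_cast [Nat.cast_sub (le_of_lt hk)]; ring
  rw [hcast, PySem.List.pyRange_zero_nat, pv_foldl_count_ite, List.countP_map, zero_add]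
  rw [pv_drop_eq_map_range l k (le_of_lt hk), List.count_eq_countP, List.countP_map]
  congr 1
  apply List.countP_congr
  intro j _
  have h2 : (k : Int) + (j : Int) = ((k + j : Nat) : Int) := by push_cast; ring
  simp only [Function.comp_apply, h2, PySem.List.pyGetD_natCast]
  rw [Bool.eq_iff_iff, decide_eq_true_iff, beq_iff_eq, eq_comm]
  simp

theorem pv_map_range_eq_F (l : List Int) :
    (List.range l.length).map (fun k => (((l.drop k).count (l.getD k 0) : Nat) : Int)) = pvF l := by
  induction l with
  | nil => simp [pvF]
  | cons x xs ih =>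
    simp only [List.length_cons, List.range_succ_eq_map, List.map_cons, List.map_map]
    simp only [pvF, List.drop_zero, List.getD_cons_zero]
    rw [← ih]
    simp [Function.comp]

theorem pvA_eq_F (l : List Int) : comp_x_val l = pvF l := by
  unfold comp_x_val
  simp only [PySem.List.foldl_append_singleton_eq_map, List.nil_append,
    PySem.List.pyRange_zero_nat, List.map_map]
  rw [← pv_map_range_eq_F]
  apply List.map_congr_left
  intro k hk
  simp only [Function.comp]
  exact pvA_inner l k (List.mem_range.mp hk)

-- B-side: the out-list produced by the fold, as a recursion on the input
def pvG : List Int → PySem.Dict Int Int → List Int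
  | [], _ => []
  | x :: xs, d =>
    let c := d.getD x 0 + 1
    c :: pvG xs (d.insert x c)

-- counts relative to an explicit multiset of already-seen elements
def pvH : List Int → List Int → List Int
  | _, [] => []
  | s, x :: xs => ((s.count x : Int) + 1) :: pvH (x :: s) xs

theorem pvB_foldl (rs : List Int) (d : PySem.Dict Int Int) (out : List Int) :
    (rs.foldl
      (fun (p : PySem.Dict Int Int × List Int) x =>
        let c := p.1.getD x 0 + 1
        (p.1.insert x c, p.2 ++ [c]))
      (d, out)).2 = out ++ pvG rs d := by
  induction rs generalizing d out with
  | nil => simp [pvG]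
  | cons x xs ih => simp [pvG, ih, List.append_assoc]

theorem pvG_eq_H (xs : List Int) (d : PySem.Dict Int Int) (s : List Int)
    (h : ∀ v, d.getD v 0 = (s.count v : Int)) : pvG xs d = pvH s xs := by
  induction xs generalizing d s with
  | nil => simp [pvG, pvH]
  | cons x xs ih =>
    simp only [pvG, pvH, h x]
    congr 1
    apply ih
    intro v
    rw [PySem.Dict.getD_insert]
    by_cases hv : v = x
    · subst hv; simp [List.count_cons_self]
    · rw [if_neg hv, h v]
      have hv' : ¬(x = v) := fun hh => hv hh.symm
      norm_cast
      simp [hv']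

theorem pvH_reverse (rs s : List Int) : pvF (rs.reverse ++ s) = (pvH s rs).reverse ++ pvF s := by
  induction rs generalizing s with
  | nil => simp [pvH]
  | cons x xs ih =>
    have hih := ih (x :: s)
    simp only [List.reverse_cons, List.append_assoc, List.singleton_append] at *
    rw [hih]
    simp only [pvH, pvF, List.reverse_cons, List.append_assoc, List.singleton_append,
      List.count_cons_self]
    norm_cast

theorem pvB_eq_F (l : List Int) : comp_x_val_alt l = pvF l := by
  unfold comp_x_val_alt
  rw [pvB_foldl]
  rw [pvG_eq_H l.reverse PySem.Dict.empty [] (by intro v; simp [PySem.Dict.getD_empty])]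
  have := pvH_reverse l.reverse []
  simp only [List.reverse_reverse, List.append_nil, pvF] at this
  rw [this]
  simp

-- ===== VERDICT (by name: the statement is the Claim_ definition above) =====
theorem comp_x_val_spec : Claim_equal_comp_x_val := by
  intro l _
  unfold Spec_comp_x_val
  rw [pvA_eq_F, pvB_eq_F]
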